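-- pv_equiv track=rewrite | github.com/amazingashis/AI-Automation-With-Reviewer | code-reviewer-feature-databricks/utils/chunker.py | chunk_pyspark_file
-- ===== SOURCE A (Python) =====
-- def chunk_pyspark_file(file_content):
--     """Splits a PySpark file into chunks, tracking the starting line number of each."""
--     chunks = []
--     current_chunk = []
--     start_line = 1
--     for i, line in enumerate(file_content.splitlines(), 1):
--         if not line.strip() and current_chunk:
--             chunks.append(("\n".join(current_chunk), start_line))
--             current_chunk = []
--         elif line.strip():
--             if not current_chunk:
--                 start_line = i
--             current_chunk.append(line)
--     if current_chunk:
--         chunks.append(("\n".join(current_chunk), start_line))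
--     return chunks
-- ===== SOURCE B (Python) =====
-- def chunk_pyspark_file(file_content):
--     """Splits a PySpark file into chunks, tracking the starting line number of each."""
--     pairs = list(enumerate(file_content.splitlines(), 1))
--     n = len(pairs)
--     chunks = []
--     j = 0
--     while j < n:
--         if pairs[j][1].strip():
--             k = j
--             while k < n and pairs[k][1].strip():
--                 k += 1
--             chunks.append(("\n".join(line for _, line in pairs[j:k]), pairs[j][0]))
--             j = k
--         else:
--             j += 1
--     return chunks
-- ===== Notes on version B (the rewrite author's own statement) =====
-- stated objective: alternative
-- what changed: Replaces A's incremental state machine (current_chunk accumulator, start_line variable, trailing flush) with a run-scanning loop that finds each maximal run of non-blank lines with an inner pointer and emits it at once.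
import Mathlib
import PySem

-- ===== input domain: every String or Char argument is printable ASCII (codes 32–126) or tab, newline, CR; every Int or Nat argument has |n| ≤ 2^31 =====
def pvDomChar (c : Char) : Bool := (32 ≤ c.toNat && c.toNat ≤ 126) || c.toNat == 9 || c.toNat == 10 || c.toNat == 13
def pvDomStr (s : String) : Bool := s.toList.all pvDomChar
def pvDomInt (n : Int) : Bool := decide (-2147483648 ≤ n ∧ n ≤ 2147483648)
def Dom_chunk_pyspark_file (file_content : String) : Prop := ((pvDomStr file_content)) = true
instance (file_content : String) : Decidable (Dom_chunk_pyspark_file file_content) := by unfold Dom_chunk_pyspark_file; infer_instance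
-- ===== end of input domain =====

-- B replaces A's current_chunk/start_line state machine with a run-scanning loop that emits each
-- maximal non-blank run at once (alternative decomposition, same cost).

-- ===== PORT A =====
-- line.strip() is falsy  ⇔  the stripped line is the empty string
def pvBlank (l : String) : Bool := PySem.Str.strip l == ""

def pvStepA (st : List (String × Int) × List String × Int) (p : Int × String) :
    List (String × Int) × List String × Int :=
  match st with
  | (chunks, current, start) =>
    if pvBlank p.2 && !current.isEmpty then
      (chunks ++ [(PySem.Str.join "\n" current, start)], [], start)
    else if !pvBlank p.2 then
      if current.isEmpty then (chunks, current ++ [p.2], p.1)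
      else (chunks, current ++ [p.2], start)
    else st

def chunk_pyspark_file (file_content : String) : List (String × Int) :=
  match (PySem.List.enumerate (PySem.Str.splitlines file_content) 1).foldl pvStepA ([], [], 1) with
  | (chunks, current, start) =>
    if current.isEmpty then chunks
    else chunks ++ [(PySem.Str.join "\n" current, start)]

-- ===== PORT B =====
-- run-scanning: skip a blank line, else emit the maximal non-blank run (takeWhile/dropWhile = the
-- inner `while k < n and …` pointer of Source B) and continue after it
def pvNb (p : Int × String) : Bool := !pvBlank p.2

def chunkAltGo : List (Int × String) → List (String × Int)
  | [] => []
  | (i, l) :: rest =>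
    if pvBlank l then chunkAltGo rest
    else (PySem.Str.join "\n" (l :: (rest.takeWhile pvNb).map (·.2)), i)
           :: chunkAltGo (rest.dropWhile pvNb)
termination_by l => l.length
decreasing_by
  · simp
  · exact Nat.lt_succ_of_le (List.length_dropWhile_le _ _)

def chunk_pyspark_file_alt (file_content : String) : List (String × Int) :=
  chunkAltGo (PySem.List.enumerate (PySem.Str.splitlines file_content) 1)

-- ===== PRECONDITION & SPEC =====
def Spec_chunk_pyspark_file (file_content : String) (out : List (String × Int)) : Prop := out = chunk_pyspark_file_alt file_content
instance (file_content : String) (out : List (String × Int)) : Decidable (Spec_chunk_pyspark_file file_content out) := by unfold Spec_chunk_pyspark_file; infer_instance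

-- ===== CLAIM (what is proved, stated in full; the proofs are below) =====
def Claim_equal_chunk_pyspark_file : Prop := ∀ (file_content : String), Dom_chunk_pyspark_file file_content → Spec_chunk_pyspark_file file_content (chunk_pyspark_file file_content)

-- ===== LEMMAS AND PROOFS =====

-- final flush of A's fold state
def pvFinish (st : List (String × Int) × List String × Int) : List (String × Int) :=
  match st with
  | (chunks, current, start) =>
    if current.isEmpty then chunks
    else chunks ++ [(PySem.Str.join "\n" current, start)]

-- loop invariant: A's fold-then-flush equals B's run recursion, for any intermediate state
theorem pvKey (pairs : List (Int × String)) :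
    ∀ (chunks : List (String × Int)) (cur : List String) (s : Int),
      pvFinish (pairs.foldl pvStepA (chunks, cur, s)) =
        if cur.isEmpty then chunks ++ chunkAltGo pairs
        else chunks ++ (PySem.Str.join "\n" (cur ++ (pairs.takeWhile pvNb).map (·.2)), s)
               :: chunkAltGo (pairs.dropWhile pvNb) := by
  induction pairs with
  | nil =>
    intro chunks cur s
    by_cases h : cur.isEmpty <;> simp [pvFinish, h, chunkAltGo]
  | cons p rest ih =>
    intro chunks cur s
    obtain ⟨i, l⟩ := p
    by_cases hb : pvBlank l
    · by_cases hc : cur.isEmpty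
      · simp [pvStepA, hb, hc, chunkAltGo, ih]
      · simp [pvStepA, hb, hc, ih, List.takeWhile_cons, List.dropWhile_cons, pvNb, chunkAltGo]
    · by_cases hc : cur.isEmpty
      · have hcur : cur = [] := by simpa [List.isEmpty_iff] using hc
        simp [pvStepA, hb, hcur, chunkAltGo, ih]
      · simp [pvStepA, hb, hc, ih, List.takeWhile_cons, List.dropWhile_cons, pvNb]

-- ===== VERDICT (by name: the statement is the Claim_ definition above) =====
theorem chunk_pyspark_file_spec : Claim_equal_chunk_pyspark_file := by
  intro file_content _
  unfold Spec_chunk_pyspark_file chunk_pyspark_file chunk_pyspark_file_alt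
  have := pvKey (PySem.List.enumerate (PySem.Str.splitlines file_content) 1) [] [] 1
  simpa [pvFinish] using this
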